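-- pv_equiv track=rewrite | github.com/OlegGasul/Leetcode | binary-string-with-substrings-representing-1-to-n.py | queryString
-- ===== SOURCE A (Python) =====
-- def queryString(s: str, n: int) -> bool:
--     def isSubstring(s1):
--         def buildPattern(string):
--             pattern = [0 for s in string]
--             j = 0
--             i = 1
--
--             while i < len(string):
--                 if string[i] == string[j]:
--                     pattern[i] = j + 1
--                     i += 1
--                     j += 1
--                 elif j > 0:
--                     j = pattern[j-1]
--                 else:
--                     i += 1
--             return [-1] + pattern
--
--         def doesMatch(string, substring, pattern):
--             i = 0
--             j = 0
--
--             while i < len(string):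
--                 if string[i] == substring[j]:
--                     if j == len(substring) - 1:
--                         return True
--                     i += 1
--                     j += 1
--                 elif j > 0:
--                     j = pattern[j]
--                 else:
--                     i += 1
--             return False
--
--         return doesMatch(s, s1, buildPattern(s1))
--
--     while n:
--         value = bin(n)[2:]
--
--         if not isSubstring(value):
--             return False
--
--         n -= 1
--
--     return True
-- ===== SOURCE B (Python) =====
-- def queryString(s: str, n: int) -> bool:
--     # Collect the set of integer values (in 1..n) of all substrings of s that
--     # are a binary numeral with a leading '1'; all of 1..n are covered iff the
--     # set has exactly n elements.
--     vals = set()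
--     L = len(s)
--     for i in range(L):
--         if s[i] == '1':
--             if 1 <= n:
--                 vals.add(1)
--             v = 1
--             j = i + 1
--             while j < L and (s[j] == '0' or s[j] == '1') and v <= n:
--                 v = 2 * v + (1 if s[j] == '1' else 0)
--                 if v <= n:
--                     vals.add(v)
--                 j += 1
--     return len(vals) == n
-- ===== Notes on version B (the rewrite author's own statement) =====
-- stated objective: faster
-- what changed: A runs a hand-written KMP search of s for bin(m) separately for every m = n..1 (O(n*(|s|+log n))); B makes one pass over s collecting the set of values <= n of all binary substrings that start with '1' and answers by comparing the set's size with n (O(|s|*min(|s|, log n))).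
import Mathlib
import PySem

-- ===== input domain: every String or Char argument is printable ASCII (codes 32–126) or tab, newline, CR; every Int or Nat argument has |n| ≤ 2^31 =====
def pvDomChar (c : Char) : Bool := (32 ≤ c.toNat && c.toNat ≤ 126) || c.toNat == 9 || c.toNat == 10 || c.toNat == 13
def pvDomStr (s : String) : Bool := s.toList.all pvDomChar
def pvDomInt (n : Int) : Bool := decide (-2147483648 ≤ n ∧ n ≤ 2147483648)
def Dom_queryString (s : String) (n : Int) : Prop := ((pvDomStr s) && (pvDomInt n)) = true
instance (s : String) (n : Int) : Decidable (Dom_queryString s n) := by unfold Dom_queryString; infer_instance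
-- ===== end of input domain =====

-- B replaces A's per-value KMP searches (one search of s for every m = n..1) by one scan of s that
-- collects the set of values of binary substrings ≤ n and compares the set's size with n.

-- ===== PORT A =====
-- A's loops are ported with an explicit fuel that bounds the Python loop's iteration count
-- (the proofs below show the fuel is never exhausted); indexing that Python performs in
-- range is ported with getD (shown in range on all reachable states).

/-- `bin(n)[2:]`. -/
def pvBinTail (n : Int) : List Char := (PySem.Int.toBinChars0b n).drop 2

/-- the `while i < len(string)` loop of `buildPattern`; fuel bounds its iteration count. -/
def buildLoop (string : List Char) : List Int → Nat → Nat → Nat → List Int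
  | pat, _, _, 0 => pat
  | pat, i, j, fuel+1 =>
    if i < string.length then
      if string.getD i ' ' == string.getD j ' ' then
        buildLoop string (pat.set i ((j : Int) + 1)) (i+1) (j+1) fuel
      else if 0 < j then
        buildLoop string pat i ((pat.getD (j-1) 0).toNat) fuel
      else
        buildLoop string pat (i+1) j fuel
    else pat

/-- `buildPattern`: `[-1] + pattern` after the loop (`pattern = [0 for s in string]`, `i = 1`, `j = 0`). -/
def buildPattern (string : List Char) : List Int :=
  (-1) :: buildLoop string (string.map fun _ => (0 : Int)) 1 0 (2 * string.length + 2)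

/-- the `while i < len(string)` loop of `doesMatch`; fuel bounds its iteration count. -/
def matchLoop (string substring : List Char) (tbl : List Int) : Nat → Nat → Nat → Bool
  | _, _, 0 => false
  | i, j, fuel+1 =>
    if i < string.length then
      if string.getD i ' ' == substring.getD j ' ' then
        if j == substring.length - 1 then true
        else matchLoop string substring tbl (i+1) (j+1) fuel
      else if 0 < j then
        matchLoop string substring tbl i ((tbl.getD j (-1)).toNat) fuel
      else
        matchLoop string substring tbl (i+1) j fuel
    else false

/-- `isSubstring(s1) = doesMatch(s, s1, buildPattern(s1))`. -/
def isSubstring (s s1 : List Char) : Bool := matchLoop s s1 (buildPattern s1) 0 0 (2 * s.length + 2)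

/-- the `while n:` loop; fuel bounds its iteration count (n steps for n ≥ 0; for n < 0 the
    loop stops once `bin(n)[2:]` is longer than s, after at most 2^|s| steps). -/
def queryLoop (s : List Char) : Int → Nat → Bool
  | _, 0 => false
  | n, fuel+1 =>
    if n == 0 then true
    else if isSubstring s (pvBinTail n) then queryLoop s (n-1) fuel
    else false

def queryString (s : String) (n : Int) : Bool :=
  queryLoop s.toList n (n.toNat + 2 ^ s.toList.length + 2)

-- ===== PORT B =====
-- one scan: from every '1' in s, extend a binary value v over '0'/'1' chars while v ≤ n,
-- recording each value ≤ n in a set; answer: the set has exactly n elements.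

/-- the inner `while` of B: extend value `v` over binary chars while `v <= n`. -/
def scanB (n : Int) : List Char → Int → PySem.Set Int → PySem.Set Int
  | [], _, vals => vals
  | c :: rest, v, vals =>
    if (c == '0' || c == '1') && decide (v ≤ n) then
      scanB n rest (2 * v + (if c == '1' then 1 else 0))
        (if 2 * v + (if c == '1' then 1 else 0) ≤ n then
           PySem.Set.add vals (2 * v + (if c == '1' then 1 else 0))
         else vals)
    else vals

/-- the outer `for i in range(L)` of B. -/
def outerB (n : Int) : List Char → PySem.Set Int → PySem.Set Int
  | [], vals => vals
  | c :: rest, vals =>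
    outerB n rest
      (if c == '1' then
         scanB n rest 1 (if (1 : Int) ≤ n then PySem.Set.add vals 1 else vals)
       else vals)

def queryString_alt (s : String) (n : Int) : Bool :=
  PySem.Set.len (outerB n s.toList PySem.Set.empty) == n

-- ===== PRECONDITION & SPEC =====
def Spec_queryString (s : String) (n : Int) (out : Bool) : Prop := out = queryString_alt s n
instance (s : String) (n : Int) (out : Bool) : Decidable (Spec_queryString s n out) := by unfold Spec_queryString; infer_instance

-- ===== CLAIM (what is proved, stated in full; the proofs are below) =====
def Claim_equal_queryString : Prop := ∀ (s : String) (n : Int), Dom_queryString s n → Spec_queryString s n (queryString s n)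

-- ===== LEMMAS AND PROOFS =====

-- #### binary numerals

def myB (n : Nat) : List Char :=
  if n < 2 then [Nat.digitChar n] else myB (n / 2) ++ [Nat.digitChar (n % 2)]
  termination_by n
  decreasing_by exact Nat.div_lt_self (by omega) (by omega)

lemma toDigitsCore_eq_myB : ∀ (f n : Nat), n < f → ∀ (acc : List Char),
    Nat.toDigitsCore 2 f n acc = myB n ++ acc := by
  intro f
  induction f with
  | zero => omega
  | succ f ih =>
    intro n hn acc
    rw [Nat.toDigitsCore]
    by_cases h2 : n < 2
    · have : n / 2 = 0 := by omega
      rw [myB]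
      simp [this, h2, Nat.mod_eq_of_lt h2]
    · have hne : ¬ n / 2 = 0 := by omega
      simp only [hne, if_false]
      rw [ih (n/2) (by omega)]
      conv_rhs => rw [myB]
      rw [if_neg (by omega)]
      simp

lemma toDigits_eq_myB (n : Nat) : Nat.toDigits 2 n = myB n := by
  simpa using toDigitsCore_eq_myB (n+1) n (by omega) []

def chVal (c : Char) : Int := if c = '1' then 1 else 0
def valFrom (a : Int) (l : List Char) : Int := l.foldl (fun x c => 2 * x + chVal c) a
lemma valFrom_cons (a : Int) (c : Char) (l : List Char) :
    valFrom a (c :: l) = valFrom (2 * a + chVal c) l := rfl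
lemma valFrom_append (a : Int) (l₁ l₂ : List Char) :
    valFrom a (l₁ ++ l₂) = valFrom (valFrom a l₁) l₂ := List.foldl_append

lemma valFrom_myB (n : Nat) : valFrom 0 (myB n) = (n : Int) := by
  induction n using Nat.strong_induction_on with
  | _ n ih =>
    rw [myB]
    by_cases h : n < 2
    · interval_cases n <;> simp [valFrom, chVal, Nat.digitChar]
    · simp only [h, if_false]
      rw [valFrom_append, ih (n/2) (Nat.div_lt_self (by omega) (by omega))]
      have h2 : n % 2 = 0 ∨ n % 2 = 1 := by omega
      rcases h2 with h2 | h2 <;>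
        · rw [h2]
          simp [valFrom, chVal, Nat.digitChar]
          omega

lemma myB_all01 (n : Nat) : ∀ c ∈ myB n, c = '0' ∨ c = '1' := by
  induction n using Nat.strong_induction_on with
  | _ n ih =>
    rw [myB]
    by_cases h : n < 2
    · interval_cases n <;> simp [Nat.digitChar]
    · simp only [h, if_false]
      intro c hc
      rcases List.mem_append.mp hc with hc | hc
      · exact ih (n/2) (Nat.div_lt_self (by omega) (by omega)) c hc
      · have h2 : n % 2 = 0 ∨ n % 2 = 1 := by omega
        simp at hc
        rcases h2 with h2 | h2 <;> rw [h2] at hc <;> simp [Nat.digitChar] at hc <;> simp [hc]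

lemma myB_ne_nil (n : Nat) : myB n ≠ [] := by
  rw [myB]; split <;> simp

lemma myB_head (n : Nat) (h : 1 ≤ n) : (myB n).head? = some '1' := by
  induction n using Nat.strong_induction_on with
  | _ n ih =>
    rw [myB]
    by_cases h2 : n < 2
    · have : n = 1 := by omega
      simp [this, Nat.digitChar]
    · simp only [h2, if_false]
      rw [List.head?_append_of_ne_nil]
      · exact ih (n/2) (Nat.div_lt_self (by omega) (by omega)) (by omega)
      · exact myB_ne_nil _

lemma chVal_nonneg (c : Char) : 0 ≤ chVal c := by unfold chVal; split <;> omega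

lemma valFrom_ge (l : List Char) : ∀ a : Int, 0 ≤ a → a ≤ valFrom a l := by
  induction l with
  | nil => simp [valFrom]
  | cons c t ih =>
    intro a ha
    rw [valFrom_cons]
    have := chVal_nonneg c
    have := ih (2*a + chVal c) (by omega)
    omega

lemma valFrom_pos {u : List Char} (h : u.head? = some '1') : 1 ≤ valFrom 0 u := by
  cases u with
  | nil => simp at h
  | cons c t =>
    simp at h
    subst h
    rw [valFrom_cons]
    have : (2 * 0 + chVal '1') = 1 := rfl
    rw [this]
    exact valFrom_ge t 1 (by omega)

lemma myB_inverse : ∀ (u : List Char), u.head? = some '1' → (∀ c ∈ u, c = '0' ∨ c = '1') →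
    myB (valFrom 0 u).toNat = u := by
  intro u
  induction u using List.reverseRecOn with
  | nil => simp
  | append_singleton w c ih =>
    intro hh h01
    cases w with
    | nil =>
      simp only [List.nil_append] at hh h01 ⊢
      simp at hh
      subst hh
      have : valFrom 0 ['1'] = 1 := by simp [valFrom, chVal]
      rw [this]
      rw [myB]; simp; decide
    | cons d t =>
      have hh' : (d :: t).head? = some '1' := by simpa using hh
      have h01' : ∀ x ∈ d :: t, x = '0' ∨ x = '1' := fun x hx => h01 x (by simp at hx ⊢; tauto)
      have ihw := ih hh' h01'
      have hw1 : 1 ≤ valFrom 0 (d :: t) := valFrom_pos hh'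
      have hsplit : d :: t ++ [c] = (d :: t) ++ [c] := rfl
      rw [hsplit, valFrom_append]
      set m := valFrom 0 (d :: t) with hm
      have hcv : chVal c = 0 ∨ chVal c = 1 := by
        rcases h01 c (by simp) with h | h <;> simp [h, chVal]
      have hval : valFrom m [c] = 2 * m + chVal c := by simp [valFrom]
      rw [hval]
      have h2m : (2 * m + chVal c).toNat = 2 * m.toNat + (chVal c).toNat := by omega
      rw [h2m, myB]
      have hlt : ¬ (2 * m.toNat + (chVal c).toNat < 2) := by omega
      simp only [hlt, if_false]
      have hdiv : (2 * m.toNat + (chVal c).toNat) / 2 = m.toNat := by omega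
      have hmod : (2 * m.toNat + (chVal c).toNat) % 2 = (chVal c).toNat := by omega
      rw [hdiv, hmod, ihw]
      congr 1
      rcases hcv with h | h <;> rw [h] <;>
        · simp [Nat.digitChar]
          rcases h01 c (by simp) with h' | h' <;> simp [h', chVal] at h ⊢

lemma chVal_le_one (c : Char) : chVal c ≤ 1 := by unfold chVal; split <;> omega

lemma valFrom_lt_pow (l : List Char) : ∀ a : Int, 0 ≤ a →
    valFrom a l < (a + 1) * 2 ^ l.length := by
  induction l with
  | nil => intro a _; simp [valFrom]
  | cons c t ih =>
    intro a ha
    rw [valFrom_cons]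
    have h1 := ih (2*a + chVal c) (by have := chVal_nonneg c; omega)
    have h2 := chVal_le_one c
    have h3 : (2*a + chVal c + 1) * 2 ^ t.length ≤ (a+1) * 2 ^ (t.length + 1) := by
      have hpow : (0:Int) < 2 ^ t.length := by positivity
      have hle : (2*a + chVal c + 1) ≤ 2 * (a + 1) := by omega
      calc (2*a + chVal c + 1) * 2 ^ t.length ≤ (2 * (a+1)) * 2 ^ t.length := by
            apply mul_le_mul_of_nonneg_right hle (by positivity)
        _ = (a+1) * 2 ^ (t.length + 1) := by ring
    simp only [List.length_cons]
    omega

lemma pvBinTail_pos {n : Int} (h : 0 < n) : pvBinTail n = myB n.toNat := by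
  simp [pvBinTail, PySem.Int.toBinChars0b, toDigits_eq_myB, not_lt.mpr (le_of_lt h)]

lemma pvBinTail_neg {n : Int} (h : n < 0) : pvBinTail n = 'b' :: myB n.natAbs := by
  simp [pvBinTail, PySem.Int.toBinChars0b, toDigits_eq_myB, h]

-- #### borders, occurrences

def borderB (p : List Char) (i b : Nat) : Bool :=
  decide (b < i) && (List.range b).all (fun k => p.getD k ' ' == p.getD (i - b + k) ' ')

lemma borderB_iff {p : List Char} {i b : Nat} :
    borderB p i b = true ↔ b < i ∧ ∀ k, k < b → p.getD k ' ' = p.getD (i - b + k) ' ' := by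
  simp [borderB, List.all_eq_true]

lemma borderB_zero {p : List Char} {i : Nat} (h : 0 < i) : borderB p i 0 = true := by
  rw [borderB_iff]; exact ⟨h, by omega⟩

lemma border_up {p : List Char} {i b : Nat} :
    borderB p (i+1) (b+1) = true ↔
      borderB p i b = true ∧ p.getD b ' ' = p.getD i ' ' := by
  rw [borderB_iff, borderB_iff]
  constructor
  · rintro ⟨hlt, hall⟩
    have hbi : b < i := by omega
    refine ⟨⟨hbi, fun k hk => ?_⟩, ?_⟩
    · have := hall k (by omega)
      have he : i + 1 - (b + 1) + k = i - b + k := by omega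
      rwa [he] at this
    · have := hall b (by omega)
      have he : i + 1 - (b + 1) + b = i := by omega
      rwa [he] at this
  · rintro ⟨⟨hbi, hall⟩, hc⟩
    refine ⟨by omega, fun k hk => ?_⟩
    have he : i + 1 - (b + 1) + k = i - b + k := by omega
    rw [he]
    rcases Nat.lt_or_ge k b with h | h
    · exact hall k h
    · have hkb : k = b := by omega
      have e : i - b + b = i := by omega
      rw [hkb, e]
      exact hc

lemma border_down {p : List Char} {i b c : Nat} (hb : borderB p i b = true)
    (hc : borderB p i c = true) (h : c < b) : borderB p b c = true := by
  rw [borderB_iff] at *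
  obtain ⟨hbi, hball⟩ := hb
  obtain ⟨hci, hcall⟩ := hc
  refine ⟨h, fun k hk => ?_⟩
  have h1 := hball (b - c + k) (by omega)
  have h2 := hcall k hk
  have e1 : i - b + (b - c + k) = i - c + k := by omega
  rw [e1] at h1
  rw [h2, ← h1]

lemma border_lift {p : List Char} {i b c : Nat} (h1 : borderB p b c = true)
    (h2 : borderB p i b = true) : borderB p i c = true := by
  rw [borderB_iff] at *
  obtain ⟨hcb, hall1⟩ := h1
  obtain ⟨hbi, hall2⟩ := h2
  refine ⟨by omega, fun k hk => ?_⟩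
  have ha := hall1 k hk
  have hb' := hall2 (b - c + k) (by omega)
  have e : i - b + (b - c + k) = i - c + k := by omega
  rw [e] at hb'
  rw [ha, hb']

def OccAt (s p : List Char) (t : Nat) : Prop :=
  t + p.length ≤ s.length ∧ ∀ k, k < p.length → s.getD (t+k) ' ' = p.getD k ' '

lemma occAt_iff_infix {s p : List Char} : (∃ t, OccAt s p t) ↔ p <:+: s := by
  constructor
  · rintro ⟨t, hlen, hall⟩
    have hp : p = (s.drop t).take p.length := by
      apply List.ext_getElem
      · simp; omega
      · intro k h1 h2
        rw [List.getElem_take, List.getElem_drop]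
        have := hall k h1
        rw [List.getD_eq_getElem s ' ' (by omega), List.getD_eq_getElem p ' ' h1] at this
        exact this.symm
    exact ((List.prefix_iff_eq_take.mpr hp).isInfix).trans (List.drop_suffix t s).isInfix
  · rintro ⟨l1, l2, rfl⟩
    refine ⟨l1.length, by simp, fun k hk => ?_⟩
    rw [List.getD_eq_getElem _ ' ' (by simp; omega), List.getD_eq_getElem _ ' ' hk]
    rw [List.getElem_append_left (by simp; omega), List.getElem_append_right (by omega)]
    congr 1
    omega

-- #### buildPattern computes the prefix function

def maxB (p : List Char) (i : Nat) : Nat := Nat.findGreatest (fun b => borderB p i b = true) (i - 1)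

lemma maxB_border {p : List Char} {i : Nat} (h : 0 < i) : borderB p i (maxB p i) = true :=
  Nat.findGreatest_spec (P := fun b => borderB p i b = true) (by omega) (borderB_zero h)

lemma maxB_lt {p : List Char} {i : Nat} (h : 0 < i) : maxB p i < i :=
  (borderB_iff.mp (maxB_border h)).1

lemma le_maxB {p : List Char} {i b : Nat} (hb : borderB p i b = true) : b ≤ maxB p i :=
  Nat.le_findGreatest (by have := (borderB_iff.mp hb).1; omega) hb

lemma getD_set_ne {pat : List Int} {i k : Nat} (h : i ≠ k) :
    (pat.set i v).getD k 0 = pat.getD k 0 := by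
  rw [List.getD_eq_getElem?_getD, List.getD_eq_getElem?_getD, List.getElem?_set_ne h]

lemma getD_set_self {pat : List Int} {i : Nat} (h : i < pat.length) {v : Int} :
    (pat.set i v).getD i 0 = v := by
  rw [List.getD_eq_getElem?_getD, List.getElem?_set_self h]
  rfl

lemma buildLoop_spec (p : List Char) : ∀ (fuel : Nat) (pat : List Int) (i j : Nat),
    pat.length = p.length →
    1 ≤ i → i ≤ p.length →
    (∀ k, k < i → pat.getD k 0 = ((maxB p (k+1) : Nat) : Int)) →
    (∀ k, i ≤ k → k < p.length → pat.getD k 0 = 0) →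
    (i < p.length → borderB p i j = true) →
    (i < p.length → ∀ b, borderB p i b = true → j < b → p.getD b ' ' ≠ p.getD i ' ') →
    2 * (p.length - i) + j < fuel →
    ∀ k, k < p.length → (buildLoop p pat i j fuel).getD k 0 = ((maxB p (k+1) : Nat) : Int) := by
  intro fuel
  induction fuel with
  | zero => intro pat i j _ _ _ _ _ _ _ hfuel; omega
  | succ fuel ih =>
    intro pat i j hlen h1i hip H1 H2 H3 H4 hfuel
    rw [buildLoop]
    by_cases hi : i < p.length
    case neg =>
      simp only [if_neg hi]
      intro k hk
      exact H1 k (by omega)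
    simp only [if_pos hi]
    have hb := H3 hi
    have hjlt : j < i := (borderB_iff.mp hb).1
    by_cases hc : (p.getD i ' ' == p.getD j ' ') = true
    · simp only [if_pos hc]
      have hceq : p.getD j ' ' = p.getD i ' ' := (beq_iff_eq.mp hc).symm
      have hup : borderB p (i+1) (j+1) = true := border_up.mpr ⟨hb, hceq⟩
      have hmaxeq : maxB p (i+1) = j + 1 := by
        refine le_antisymm ?_ (le_maxB hup)
        by_contra hgt
        have hmb := maxB_border (p := p) (i := i+1) (by omega)
        obtain ⟨b, hbeq⟩ : ∃ b, maxB p (i+1) = b + 1 := ⟨maxB p (i+1) - 1, by omega⟩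
        rw [hbeq] at hmb
        obtain ⟨hbB, hchar⟩ := border_up.mp hmb
        exact H4 hi b hbB (by omega) hchar
      apply ih
      · simpa using hlen
      · omega
      · omega
      · intro k hk
        rcases Nat.lt_or_ge k i with h | h
        · rw [getD_set_ne (by omega)]
          exact H1 k h
        · have hki : k = i := by omega
          subst hki
          rw [getD_set_self (by omega)]
          rw [hmaxeq]
          push_cast
          ring
      · intro k hk1 hk2
        rw [getD_set_ne (by omega)]
        exact H2 k (by omega) hk2
      · intro _
        exact hup
      · intro hi1 b hbB hjb
        have := le_maxB hbB
        omega
      · omega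
    · simp only [if_neg hc]
      have hcne : p.getD i ' ' ≠ p.getD j ' ' := by
        intro h; exact hc (beq_iff_eq.mpr h)
      by_cases hj : 0 < j
      · simp only [if_pos hj]
        have hjm : pat.getD (j-1) 0 = ((maxB p j : Nat) : Int) := by
          have := H1 (j-1) (by omega)
          rwa [Nat.sub_add_cancel (by omega)] at this
        have hj' : (pat.getD (j-1) 0).toNat = maxB p j := by rw [hjm]; omega
        rw [hj']
        have hbj' : borderB p j (maxB p j) = true := maxB_border hj
        have hj'lt : maxB p j < j := maxB_lt hj
        apply ih pat i (maxB p j) hlen h1i hip H1 H2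
        · intro _
          exact border_lift hbj' hb
        · intro hi1 b hbB hjb
          rcases Nat.lt_trichotomy b j with h | h | h
          · exfalso
            have := le_maxB (border_down hb hbB h)
            omega
          · subst h
            intro hcontra
            exact hcne hcontra.symm
          · exact H4 hi1 b hbB h
        · omega
      · simp only [if_neg hj]
        have hj0 : j = 0 := by omega
        subst hj0
        have hmax0 : maxB p (i+1) = 0 := by
          by_contra hne
          have hmb := maxB_border (p := p) (i := i+1) (by omega)
          obtain ⟨b, hbeq⟩ : ∃ b, maxB p (i+1) = b + 1 := ⟨maxB p (i+1) - 1, by omega⟩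
          rw [hbeq] at hmb
          obtain ⟨hbB, hchar⟩ := border_up.mp hmb
          rcases Nat.eq_zero_or_pos b with hb0 | hbpos
          · subst hb0
            exact hcne hchar.symm
          · exact H4 hi b hbB hbpos hchar
        apply ih pat (i+1) 0 hlen (by omega) (by omega)
        · intro k hk
          rcases Nat.lt_or_ge k i with h | h
          · exact H1 k h
          · rw [show k = i from by omega, H2 i (by omega) hi, hmax0]
            simp
        · intro k hk1 hk2
          exact H2 k (by omega) hk2
        · intro h
          exact borderB_zero (by omega)
        · intro h b hbB hb0
          have := le_maxB hbB
          omega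
        · omega

def TblGood (p : List Char) (tbl : List Int) : Prop :=
  ∀ j, 1 ≤ j → j ≤ p.length → tbl.getD j (-1) = ((maxB p j : Nat) : Int)

lemma buildLoop_length (string : List Char) : ∀ (fuel : Nat) (pat : List Int) (i j : Nat),
    (buildLoop string pat i j fuel).length = pat.length := by
  intro fuel
  induction fuel with
  | zero => intro pat i j; rfl
  | succ fuel ih =>
    intro pat i j
    rw [buildLoop]
    split
    · split
      · rw [ih]; simp
      · split
        · rw [ih]
        · rw [ih]
    · rfl

lemma getD_map_zero (p : List Char) (k : Nat) : ((p.map fun _ => (0:Int)).getD k 0) = 0 := by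
  rw [List.getD_eq_getElem?_getD, List.getElem?_map]
  cases p[k]? <;> simp

lemma buildPattern_good (p : List Char) (hp : p ≠ []) : TblGood p (buildPattern p) := by
  intro j hj1 hj2
  have hplen : 1 ≤ p.length := List.length_pos_iff.mpr hp
  have hfin := buildLoop_spec p (2 * p.length + 2) (p.map fun _ => (0:Int)) 1 0
    (by simp) (by omega) hplen
    (by
      intro k hk
      have hk0 : k = 0 := by omega
      subst hk0
      rw [getD_map_zero]
      simp [maxB])
    (fun k _ _ => getD_map_zero p k)
    (fun _ => borderB_zero (by omega))
    (by
      intro h b hbB hb0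
      have := (borderB_iff.mp hbB).1
      omega)
    (by omega)
  have hlen : (buildLoop p (p.map fun _ => (0:Int)) 1 0 (2*p.length+2)).length = p.length := by
    rw [buildLoop_length]; simp
  have := hfin (j-1) (by omega)
  show ((-1 : Int) :: _).getD j (-1) = _
  have hj : j = (j-1) + 1 := by omega
  rw [hj]
  show (buildLoop p (p.map fun _ => (0:Int)) 1 0 (2*p.length+2)).getD (j-1) (-1) = _
  rw [List.getD_eq_getElem _ _ (by omega), ← List.getD_eq_getElem _ 0 (by omega)]
  rw [this]

-- #### doesMatch finds exactly the occurrences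

lemma matchLoop_spec (s p : List Char) (tbl : List Int) (htbl : TblGood p tbl) :
    ∀ (fuel : Nat) (i j : Nat),
    j < p.length → j ≤ i → i ≤ s.length →
    (∀ k, k < j → s.getD (i - j + k) ' ' = p.getD k ' ') →
    (∀ t, t < i - j → ¬ OccAt s p t) →
    2 * (s.length - i) + j < fuel →
    (matchLoop s p tbl i j fuel = true ↔ ∃ t, OccAt s p t) := by
  intro fuel
  induction fuel with
  | zero => intro i j _ _ _ _ _ hfuel; omega
  | succ fuel ih =>
    intro i j Hj Hji His Hmatch Hno Hfuel
    rw [matchLoop]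
    by_cases hi : i < s.length
    case neg =>
      simp only [if_neg hi]
      constructor
      · intro h; cases h
      · rintro ⟨t, ht⟩
        exact absurd ht (Hno t (by have := ht.1; omega))
    simp only [if_pos hi]
    by_cases hc : (s.getD i ' ' == p.getD j ' ') = true
    · simp only [if_pos hc]
      have hceq : s.getD i ' ' = p.getD j ' ' := beq_iff_eq.mp hc
      by_cases hj : (j == p.length - 1) = true
      · simp only [if_pos hj]
        have hjeq : j = p.length - 1 := beq_iff_eq.mp hj
        constructor
        · intro _
          refine ⟨i - j, by omega, fun k hk => ?_⟩
          rcases Nat.lt_or_ge k j with h | h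
          · exact Hmatch k h
          · rw [show k = j from by omega, show i - j + j = i from by omega]
            exact hceq
        · intro _; trivial
      · simp only [if_neg hj]
        have hjne : j ≠ p.length - 1 := fun h => hj (by simp [h])
        apply ih (i+1) (j+1) (by omega) (by omega) (by omega)
        · intro k hk
          rw [show i + 1 - (j+1) + k = i - j + k from by omega]
          rcases Nat.lt_or_ge k j with h | h
          · exact Hmatch k h
          · rw [show k = j from by omega, show i - j + j = i from by omega]
            exact hceq
        · intro t ht
          exact Hno t (by omega)
        · omega
    · simp only [if_neg hc]
      have hcne : s.getD i ' ' ≠ p.getD j ' ' := fun h => hc (beq_iff_eq.mpr h)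
      by_cases hjpos : 0 < j
      · simp only [if_pos hjpos]
        have htj : tbl.getD j (-1) = ((maxB p j : Nat) : Int) := htbl j (by omega) (by omega)
        have hj' : (tbl.getD j (-1)).toNat = maxB p j := by rw [htj]; omega
        rw [hj']
        have hbj' := maxB_border (p := p) (i := j) hjpos
        obtain ⟨hj'lt, hbord⟩ := borderB_iff.mp hbj'
        apply ih i (maxB p j) (by omega) (by omega) His
        · intro k hk
          have h1 := hbord k hk
          have h2 := Hmatch (j - maxB p j + k) (by omega)
          rw [show i - j + (j - maxB p j + k) = i - maxB p j + k from by omega] at h2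
          rw [h2, ← h1]
        · intro t ht
          rcases Nat.lt_or_ge t (i - j) with h | h
          · exact Hno t h
          · rintro ⟨hlen2, hall2⟩
            have hbt : i - t ≤ j := by omega
            rcases Nat.lt_or_ge (i - t) j with hblt | hbge
            · -- i - t is a border of p.take j longer than maxB p j: contradiction
              have hbB : borderB p j (i - t) = true := by
                rw [borderB_iff]
                refine ⟨hblt, fun k hk => ?_⟩
                have h1 := hall2 k (by omega)
                have h2 := Hmatch (j - (i - t) + k) (by omega)
                rw [show i - j + (j - (i - t) + k) = t + k from by omega] at h2
                rw [← h2, h1]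
              have := le_maxB hbB
              omega
            · -- t = i - j: the current char would have to match
              have ht2 : t = i - j := by omega
              have := hall2 j Hj
              rw [show t + j = i from by omega] at this
              exact hcne this
        · omega
      · simp only [if_neg hjpos]
        have hj0 : j = 0 := by omega
        subst hj0
        apply ih (i+1) 0 Hj (by omega) (by omega) (by omega)
        · intro t ht
          rcases Nat.lt_or_ge t i with h | h
          · exact Hno t (by omega)
          · rintro ⟨hlen2, hall2⟩
            have ht2 : t = i := by omega
            have := hall2 0 (by omega)
            rw [show t + 0 = i from by omega] at this
            exact hcne this
        · omega

lemma isSubstring_iff {s p : List Char} (hp : p ≠ []) :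
    isSubstring s p = true ↔ p <:+: s := by
  rw [isSubstring, ← occAt_iff_infix]
  exact matchLoop_spec s p (buildPattern p) (buildPattern_good p hp)
    (2 * s.length + 2) 0 0 (List.length_pos_iff.mpr hp) (by omega) (by omega)
    (by intro k hk; exact absurd hk (by omega))
    (by intro t ht; exact absurd ht (by omega))
    (by omega)

-- #### the outer loop of A

lemma queryLoop_nonneg (s : List Char) : ∀ (fuel : Nat) (n : Int), 0 ≤ n → n.toNat < fuel →
    (queryLoop s n fuel = true ↔
      ∀ m : Int, 1 ≤ m → m ≤ n → isSubstring s (pvBinTail m) = true) := by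
  intro fuel
  induction fuel with
  | zero => intro n h0 h; omega
  | succ fuel ih =>
    intro n h0 hf
    rw [queryLoop]
    by_cases hn : (n == 0) = true
    · have hn' : n = 0 := beq_iff_eq.mp hn
      subst hn'
      simp only [if_pos hn]
      constructor
      · intro _ m h1 h2
        exfalso
        omega
      · intro _
        trivial
    · simp only [if_neg hn]
      have hn1 : 1 ≤ n := by
        have : n ≠ 0 := fun h => hn (beq_iff_eq.mpr h)
        omega
      by_cases hs : isSubstring s (pvBinTail n) = true
      · simp only [if_pos hs]
        rw [ih (n-1) (by omega) (by omega)]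
        constructor
        · intro h m h1 h2
          rcases eq_or_lt_of_le h2 with he | hlt
          · rw [he]
            exact hs
          · exact h m h1 (by omega)
        · intro h m h1 h2
          exact h m h1 (by omega)
      · simp only [if_neg hs]
        constructor
        · intro h
          cases h
        · intro h
          exact absurd (h n hn1 le_rfl) hs

lemma queryLoop_neg (s : List Char) : ∀ (fuel : Nat) (n : Int), n < 0 → 1 ≤ fuel →
    2 ^ s.length + 1 ≤ fuel + n.natAbs → queryLoop s n fuel = false := by
  intro fuel
  induction fuel with
  | zero => intro n _ h _; omega
  | succ fuel ih =>
    intro n hneg _ hbound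
    rw [queryLoop]
    rw [if_neg (show ¬ (n == 0) = true from fun h => by have := beq_iff_eq.mp h; omega)]
    by_cases hs : isSubstring s (pvBinTail n) = true
    · rw [if_pos hs]
      have hpb : pvBinTail n = 'b' :: myB n.natAbs := pvBinTail_neg hneg
      have hinf : pvBinTail n <:+: s := (isSubstring_iff (by rw [hpb]; simp)).mp hs
      have hlen : (pvBinTail n).length ≤ s.length := hinf.length_le
      rw [hpb] at hlen
      simp only [List.length_cons] at hlen
      have hv := valFrom_myB n.natAbs
      have hlt := valFrom_lt_pow (myB n.natAbs) 0 le_rfl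
      rw [hv] at hlt
      have hlt' : (n.natAbs : Int) < 2 ^ (myB n.natAbs).length := by
        have : ((0:Int) + 1) * 2 ^ (myB n.natAbs).length = 2 ^ (myB n.natAbs).length := by ring
        omega
      have hltn : n.natAbs < 2 ^ (myB n.natAbs).length := by exact_mod_cast hlt'
      have hmono : 2 ^ (myB n.natAbs).length ≤ 2 ^ (s.length - 1) :=
        Nat.pow_le_pow_right (by omega) (by omega)
      have hltn2 : n.natAbs < 2 ^ (s.length - 1) := lt_of_lt_of_le hltn hmono
      have h2L : 2 ^ s.length = 2 * 2 ^ (s.length - 1) := by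
        rw [← pow_succ']
        congr 1
        omega
      have habs : (n-1).natAbs = n.natAbs + 1 := by omega
      set A := 2 ^ (s.length - 1) with hA
      set B := 2 ^ s.length with hB
      apply ih (n-1) (by omega) (by omega) (by omega)
    · rw [if_neg hs]

-- #### membership in B's set

lemma mem_scanB (n : Int) : ∀ (cs : List Char) (v : Int) (vals : PySem.Set Int) (x : Int),
    1 ≤ v →
    (x ∈ scanB n cs v vals ↔ x ∈ vals ∨
      ∃ k, 1 ≤ k ∧ k ≤ cs.length ∧ (∀ c ∈ cs.take k, c = '0' ∨ c = '1') ∧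
        valFrom v (cs.take k) ≤ n ∧ x = valFrom v (cs.take k)) := by
  intro cs
  induction cs with
  | nil =>
    intro v vals x hv
    rw [scanB]
    constructor
    · exact Or.inl
    · rintro (h | ⟨k, hk1, hk2, _⟩)
      · exact h
      · simp at hk2; omega
  | cons c rest ih =>
    intro v vals x hv
    rw [scanB]
    by_cases hg : ((c == '0' || c == '1') && decide (v ≤ n)) = true
    · simp only [if_pos hg]
      rw [Bool.and_eq_true, Bool.or_eq_true] at hg
      obtain ⟨h01, hvn'⟩ := hg
      have hvn : v ≤ n := of_decide_eq_true hvn'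
      have h01' : c = '0' ∨ c = '1' := by
        rcases h01 with h | h
        · exact Or.inl (beq_iff_eq.mp h)
        · exact Or.inr (beq_iff_eq.mp h)
      have hchb : chVal c = (if c == '1' then (1:Int) else 0) := by
        rcases h01' with h | h <;> subst h <;> simp [chVal]
      set b : Int := (if c == '1' then (1:Int) else 0) with hbdef
      have hbrange : b = 0 ∨ b = 1 := by rw [hbdef]; split <;> simp
      have hv' : 1 ≤ 2*v + b := by omega
      rw [ih (2*v+b) _ x hv']
      have hmem' : x ∈ (if 2*v+b ≤ n then PySem.Set.add vals (2*v+b) else vals) ↔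
          (x ∈ vals ∨ (2*v+b ≤ n ∧ x = 2*v+b)) := by
        split
        · rw [PySem.Set.mem_add]; tauto
        · constructor
          · exact Or.inl
          · rintro (h | ⟨h1, h2⟩)
            · exact h
            · omega
      rw [hmem']
      constructor
      · rintro ((h | ⟨h1, h2⟩) | ⟨k, hk1, hk2, hall, hval, hx⟩)
        · exact Or.inl h
        · refine Or.inr ⟨1, by omega, by simp, ?_, ?_, ?_⟩
          · intro d hd
            simp [List.take_succ_cons] at hd
            rw [hd]; exact h01'
          · rw [List.take_succ_cons, List.take_zero, valFrom_cons, hchb]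
            simpa using h1
          · rw [List.take_succ_cons, List.take_zero, valFrom_cons, hchb]
            simpa using h2
        · refine Or.inr ⟨k+1, by omega, by simpa using hk2, ?_, ?_, ?_⟩
          · intro d hd
            rw [List.take_succ_cons] at hd
            rcases List.mem_cons.mp hd with h | h
            · rw [h]; exact h01'
            · exact hall d h
          · rw [List.take_succ_cons, valFrom_cons, hchb]
            exact hval
          · rw [List.take_succ_cons, valFrom_cons, hchb]
            exact hx
      · rintro (h | ⟨k, hk1, hk2, hall, hval, hx⟩)
        · exact Or.inl (Or.inl h)
        · obtain ⟨k', rfl⟩ : ∃ k', k = k' + 1 := ⟨k - 1, by omega⟩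
          rw [List.take_succ_cons] at hall hval hx
          rw [valFrom_cons, hchb] at hval hx
          rcases Nat.eq_zero_or_pos k' with hk0 | hkpos
          · subst hk0
            simp only [List.take_zero] at hval hx
            simp only [valFrom] at hval hx
            exact Or.inl (Or.inr ⟨by simpa using hval, by simpa using hx⟩)
          · refine Or.inr ⟨k', by omega, by simpa using hk2, ?_, hval, hx⟩
            intro d hd
            exact hall d (by simp [hd])
    · simp only [if_neg hg]
      constructor
      · exact Or.inl
      · rintro (h | ⟨k, hk1, hk2, hall, hval, hx⟩)
        · exact h
        · exfalso
          obtain ⟨k', rfl⟩ : ∃ k', k = k' + 1 := ⟨k - 1, by omega⟩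
          have hc01 : c = '0' ∨ c = '1' := hall c (by rw [List.take_succ_cons]; simp)
          have hbeq : (c == '0' || c == '1') = true := by
            rcases hc01 with h | h <;> simp [h]
          have hvn : ¬ v ≤ n := by
            intro hle
            exact hg (by simp [hbeq, hle])
          rw [List.take_succ_cons, valFrom_cons] at hval
          have h1 : 2*v + chVal c ≤ valFrom (2*v + chVal c) (rest.take k') :=
            valFrom_ge _ _ (by have := chVal_nonneg c; omega)
          have := chVal_nonneg c
          omega

lemma mem_outerB (n : Int) : ∀ (cs : List Char) (vals : PySem.Set Int) (x : Int),
    (x ∈ outerB n cs vals ↔ x ∈ vals ∨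
      ∃ u, u <:+: cs ∧ u.head? = some '1' ∧ (∀ c ∈ u, c = '0' ∨ c = '1') ∧
        valFrom 0 u ≤ n ∧ valFrom 0 u = x) := by
  intro cs
  induction cs with
  | nil =>
    intro vals x
    rw [outerB]
    constructor
    · exact Or.inl
    · rintro (h | ⟨u, hinf, hh, _⟩)
      · exact h
      · rw [List.infix_nil] at hinf
        subst hinf
        simp at hh
  | cons c rest ih =>
    intro vals x
    rw [outerB, ih]
    by_cases hc : (c == '1') = true
    · have hc' : c = '1' := beq_iff_eq.mp hc
      subst hc'
      simp only [if_pos hc]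
      rw [mem_scanB n rest 1 _ x (by omega)]
      have hv1 : x ∈ (if (1:Int) ≤ n then PySem.Set.add vals 1 else vals) ↔
          (x ∈ vals ∨ ((1:Int) ≤ n ∧ x = 1)) := by
        split
        · rw [PySem.Set.mem_add]; tauto
        · constructor
          · exact Or.inl
          · rintro (h | ⟨h1, h2⟩)
            · exact h
            · omega
      rw [hv1]
      constructor
      · rintro (((h | ⟨h1, h2⟩) | ⟨k, hk1, hk2, hall, hval, hx⟩) | ⟨u, hinf, hh, h01, hle, hvx⟩)
        · exact Or.inl h
        · refine Or.inr ⟨['1'], ⟨[], rest, by simp⟩, by simp, by simp, ?_, ?_⟩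
          · show valFrom 0 ['1'] ≤ n
            simpa [valFrom, chVal] using h1
          · show valFrom 0 ['1'] = x
            simp [valFrom, chVal]; omega
        · refine Or.inr ⟨'1' :: rest.take k, ?_, by simp, ?_, ?_, ?_⟩
          · refine ⟨[], rest.drop k, ?_⟩
            simp [List.take_append_drop]
          · intro d hd
            rcases List.mem_cons.mp hd with h | h
            · exact Or.inr h
            · exact hall d h
          · rw [valFrom_cons]
            simpa [chVal] using hval
          · rw [valFrom_cons, show (2*(0:Int) + chVal '1') = 1 from by norm_num [chVal]]
            exact hx.symm
        · exact Or.inr ⟨u, List.infix_cons_iff.mpr (Or.inr hinf), hh, h01, hle, hvx⟩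
      · rintro (h | ⟨u, hinf, hh, h01, hle, hvx⟩)
        · exact Or.inl (Or.inl (Or.inl h))
        · rcases List.infix_cons_iff.mp hinf with hpre | hinf'
          · -- u is a prefix of '1' :: rest
            cases u with
            | nil => simp at hh
            | cons d w =>
              have hd : d = '1' := by simpa using hh
              subst hd
              have hw : w <+: rest := (List.cons_prefix_cons.mp hpre).2
              have hwtake : w = rest.take w.length := List.prefix_iff_eq_take.mp hw
              rcases Nat.eq_zero_or_pos w.length with hw0 | hwpos
              · have hwnil : w = [] := List.eq_nil_of_length_eq_zero hw0
                subst hwnil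
                refine Or.inl (Or.inl (Or.inr ⟨?_, ?_⟩))
                · simpa [valFrom, chVal] using hle
                · simp only [valFrom, chVal] at hvx
                  simp at hvx
                  omega
              · refine Or.inl (Or.inr ⟨w.length, by omega, hw.length_le, ?_, ?_, ?_⟩)
                · intro d hd
                  rw [← hwtake] at hd
                  exact h01 d (List.mem_cons_of_mem _ hd)
                · rw [← hwtake]
                  rw [valFrom_cons, show (2*(0:Int) + chVal '1') = 1 from by norm_num [chVal]] at hle
                  exact hle
                · rw [← hwtake]
                  rw [valFrom_cons, show (2*(0:Int) + chVal '1') = 1 from by norm_num [chVal]] at hvx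
                  exact hvx.symm
          · exact Or.inr ⟨u, hinf', hh, h01, hle, hvx⟩
    · simp only [if_neg hc]
      constructor
      · rintro (h | ⟨u, hinf, hh, h01, hle, hvx⟩)
        · exact Or.inl h
        · exact Or.inr ⟨u, (List.infix_cons_iff.mpr (Or.inr hinf)), hh, h01, hle, hvx⟩
      · rintro (h | ⟨u, hinf, hh, h01, hle, hvx⟩)
        · exact Or.inl h
        · rcases List.infix_cons_iff.mp hinf with hpre | hinf'
          · exfalso
            cases u with
            | nil => simp at hh
            | cons d w =>
              have hd : d = '1' := by simpa using hh
              subst hd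
              have := (List.cons_prefix_cons.mp hpre).1
              exact hc (by simp [← this])
          · exact Or.inr ⟨u, hinf', hh, h01, hle, hvx⟩

lemma nodup_addIf {P : Prop} [Decidable P] {vals : PySem.Set Int} {y : Int} (h : vals.Nodup) :
    (if P then PySem.Set.add vals y else vals).Nodup := by
  split
  · exact PySem.Set.nodup_add _ _ h
  · exact h

lemma nodup_scanB (n : Int) : ∀ (cs : List Char) (v : Int) (vals : PySem.Set Int),
    vals.Nodup → (scanB n cs v vals).Nodup := by
  intro cs
  induction cs with
  | nil => intro v vals h; exact h
  | cons c rest ih =>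
    intro v vals h
    rw [scanB]
    by_cases hg : ((c == '0' || c == '1') && decide (v ≤ n)) = true
    · rw [if_pos hg]
      exact ih _ _ (nodup_addIf h)
    · rw [if_neg hg]
      exact h

lemma nodup_outerB (n : Int) : ∀ (cs : List Char) (vals : PySem.Set Int),
    vals.Nodup → (outerB n cs vals).Nodup := by
  intro cs
  induction cs with
  | nil => intro vals h; exact h
  | cons c rest ih =>
    intro vals h
    rw [outerB]
    apply ih
    by_cases hc : (c == '1') = true
    · rw [if_pos hc]
      exact nodup_scanB n rest 1 _ (nodup_addIf h)
    · rw [if_neg hc]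
      exact h

lemma mem_vals_iff (s : List Char) (n x : Int) :
    x ∈ outerB n s PySem.Set.empty ↔ 1 ≤ x ∧ x ≤ n ∧ myB x.toNat <:+: s := by
  rw [mem_outerB]
  constructor
  · rintro (h | ⟨u, hinf, hh, h01, hle, hvx⟩)
    · simp [PySem.Set.empty] at h
    · have hx1 : 1 ≤ x := hvx ▸ valFrom_pos hh
      refine ⟨hx1, hvx ▸ hle, ?_⟩
      have := myB_inverse u hh h01
      rw [hvx] at this
      rw [this]
      exact hinf
  · rintro ⟨h1, hn, hinf⟩
    refine Or.inr ⟨myB x.toNat, hinf, myB_head _ (by omega), myB_all01 _, ?_, ?_⟩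
    · rw [valFrom_myB]; omega
    · rw [valFrom_myB]; omega

lemma len_eq_iff_all (s : List Char) (n : Int) (hn : 0 ≤ n) :
    ((outerB n s PySem.Set.empty).length = n.toNat ↔
      ∀ m : Int, 1 ≤ m → m ≤ n → m ∈ outerB n s PySem.Set.empty) := by
  set vs := outerB n s PySem.Set.empty with hvs
  have hnd : vs.Nodup := nodup_outerB n s _ List.nodup_nil
  have hsub : ∀ x ∈ vs, x ∈ Finset.Icc 1 n := by
    intro x hx
    rw [Finset.mem_Icc]
    have := (mem_vals_iff s n x).mp hx
    exact ⟨this.1, this.2.1⟩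
  have hcardIcc : (Finset.Icc (1:Int) n).card = n.toNat := by
    rw [Int.card_Icc]
    omega
  have hlen : vs.length = vs.toFinset.card := (List.toFinset_card_of_nodup hnd).symm
  constructor
  · intro hlc m h1 h2
    have hsub' : vs.toFinset ⊆ Finset.Icc 1 n := by
      intro x hx
      exact hsub x (List.mem_toFinset.mp hx)
    have : vs.toFinset = Finset.Icc 1 n := by
      apply Finset.eq_of_subset_of_card_le hsub'
      rw [← hlen, hlc, hcardIcc]
    have hm : m ∈ vs.toFinset := by
      rw [this, Finset.mem_Icc]
      exact ⟨h1, h2⟩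
    exact List.mem_toFinset.mp hm
  · intro hall
    have : vs.toFinset = Finset.Icc 1 n := by
      apply Finset.ext
      intro m
      rw [List.mem_toFinset, Finset.mem_Icc]
      constructor
      · intro h
        have := hsub m h
        rwa [Finset.mem_Icc] at this
      · rintro ⟨h1, h2⟩
        exact hall m h1 h2
    rw [hlen, this, hcardIcc]

-- #### assembly

lemma main_equal (s : String) (n : Int) : queryString s n = queryString_alt s n := by
  rw [queryString, queryString_alt]
  have hlenIs : PySem.Set.len (outerB n s.toList PySem.Set.empty) =
      ((outerB n s.toList PySem.Set.empty).length : Int) := rfl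
  rcases lt_or_ge n 0 with hneg | hpos
  · have hfuel1 : 1 ≤ n.toNat + 2 ^ s.toList.length + 2 := by
      generalize 2 ^ s.toList.length = G
      omega
    have hfuel2 : 2 ^ s.toList.length + 1 ≤ (n.toNat + 2 ^ s.toList.length + 2) + n.natAbs := by
      generalize 2 ^ s.toList.length = G
      omega
    rw [queryLoop_neg s.toList (n.toNat + 2 ^ s.toList.length + 2) n hneg hfuel1 hfuel2]
    have hempty : outerB n s.toList PySem.Set.empty = [] := by
      rw [List.eq_nil_iff_forall_not_mem]
      intro x hx
      have := (mem_vals_iff s.toList n x).mp hx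
      omega
    rw [hempty] at hlenIs ⊢
    symm
    rw [hlenIs]
    simp only [List.length_nil, Nat.cast_zero]
    rw [Bool.eq_false_iff]
    intro h
    have := beq_iff_eq.mp h
    omega
  · rw [Bool.eq_iff_iff]
    have hfuel : n.toNat < n.toNat + 2 ^ s.toList.length + 2 := by
      generalize 2 ^ s.toList.length = G
      omega
    rw [queryLoop_nonneg s.toList (n.toNat + 2 ^ s.toList.length + 2) n hpos hfuel]
    have hrhs : (PySem.Set.len (outerB n s.toList PySem.Set.empty) == n) = true ↔
        (outerB n s.toList PySem.Set.empty).length = n.toNat := by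
      rw [hlenIs, beq_iff_eq]
      omega
    rw [hrhs, len_eq_iff_all s.toList n hpos]
    constructor
    · intro h m h1 h2
      rw [mem_vals_iff]
      refine ⟨h1, h2, ?_⟩
      have hm := h m h1 h2
      rw [pvBinTail_pos (by omega)] at hm
      exact (isSubstring_iff (myB_ne_nil _)).mp hm
    · intro h m h1 h2
      rw [pvBinTail_pos (by omega)]
      rw [isSubstring_iff (myB_ne_nil _)]
      exact ((mem_vals_iff s.toList n m).mp (h m h1 h2)).2.2

-- ===== VERDICT (by name: the statement is the Claim_ definition above) =====
theorem queryString_spec : Claim_equal_queryString := by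
  intro s n _
  unfold Spec_queryString
  exact main_equal s n
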